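-- pv_equiv track=rewrite | github.com/dittolongindit89/aksara-jawa-mod | app/utils/restructure_text.py | post_process_reconstructed_text
-- ===== SOURCE A (Python) =====
-- def post_process_reconstructed_text(text):
--     """
--     Post-process the reconstructed text to clean up single-character segments.
--     """
--     words = text.split()
--     merged_words = []
--     i = 0
--     while i < len(words):
--         if len(words[i]) == 1 and i + 1 < len(words) and len(words[i + 1]) == 1:
--             # Merge single characters (e.g., "n y a" -> "nya")
--             merged_word = words[i] + words[i + 1]
--             merged_words.append(merged_word)
--             i += 2
--         else:
--             merged_words.append(words[i])
--             i += 1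
--     return " ".join(merged_words)
-- ===== SOURCE B (Python) =====
-- def post_process_reconstructed_text(text):
--     """One-pass fold with a pending-single-char state machine (no index lookahead)."""
--     out = []
--     pending = None
--     for w in text.split():
--         if len(w) == 1:
--             if pending is None:
--                 pending = w
--             else:
--                 out.append(pending + w)
--                 pending = None
--         else:
--             if pending is not None:
--                 out.append(pending)
--                 pending = None
--             out.append(w)
--     if pending is not None:
--         out.append(pending)
--     return " ".join(out)
-- ===== Notes on version B (the rewrite author's own statement) =====
-- stated objective: alternative
-- what changed: Replaced the index-based while loop with i+1 lookahead by a single left fold over the split words carrying a pending-single-character state (merged on the next single char, flushed before a longer word and at the end).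
import Mathlib
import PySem

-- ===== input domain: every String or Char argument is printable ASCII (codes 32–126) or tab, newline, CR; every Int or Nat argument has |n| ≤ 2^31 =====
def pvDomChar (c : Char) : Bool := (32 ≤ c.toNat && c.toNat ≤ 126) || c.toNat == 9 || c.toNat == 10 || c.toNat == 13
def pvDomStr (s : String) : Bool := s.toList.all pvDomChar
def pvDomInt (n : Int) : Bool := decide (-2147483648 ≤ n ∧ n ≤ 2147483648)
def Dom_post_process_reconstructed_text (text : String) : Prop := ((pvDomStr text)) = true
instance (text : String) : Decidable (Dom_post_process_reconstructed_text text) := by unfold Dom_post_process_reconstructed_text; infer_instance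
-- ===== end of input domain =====

-- B replaces A's index-scan with lookahead by a one-pass fold carrying a pending single char; alternative decomposition, same cost.

-- ===== PORT A =====
-- while-loop over the word index; words[i] / words[i+1] are read under the guards
-- i < len(words) / i+1 < len(words), so List.getD is exact there.
def pvALoop (words : List String) (i : Nat) (acc : List String) : List String :=
  if _h : i < words.length then
    if PySem.Str.len (words.getD i "") = 1 ∧ i + 1 < words.length ∧
        PySem.Str.len (words.getD (i+1) "") = 1 then
      pvALoop words (i+2) (acc ++ [words.getD i "" ++ words.getD (i+1) ""])
    else
      pvALoop words (i+1) (acc ++ [words.getD i ""])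
  else acc
termination_by words.length - i
decreasing_by all_goals omega

def post_process_reconstructed_text (text : String) : String :=
  PySem.Str.join " " (pvALoop (PySem.Str.split₀ text) 0 [])

-- ===== PORT B =====
-- one step of the fold: state = (output so far, pending unpaired single char)
def pvBStep (st : List String × Option String) (w : String) : List String × Option String :=
  if PySem.Str.len w = 1 then
    match st.2 with
    | none => (st.1, some w)
    | some p => (st.1 ++ [p ++ w], none)
  else
    match st.2 with
    | none => (st.1 ++ [w], none)
    | some p => (st.1 ++ [p, w], none)

def post_process_reconstructed_text_alt (text : String) : String :=
  let st := (PySem.Str.split₀ text).foldl pvBStep ([], none)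
  PySem.Str.join " " (st.1 ++ st.2.toList)

-- ===== PRECONDITION & SPEC =====
def Spec_post_process_reconstructed_text (text : String) (out : String) : Prop := out = post_process_reconstructed_text_alt text
instance (text : String) (out : String) : Decidable (Spec_post_process_reconstructed_text text out) := by unfold Spec_post_process_reconstructed_text; infer_instance

-- ===== CLAIM (what is proved, stated in full; the proofs are below) =====
def Claim_equal_post_process_reconstructed_text : Prop := ∀ (text : String), Dom_post_process_reconstructed_text text → Spec_post_process_reconstructed_text text (post_process_reconstructed_text text)

-- ===== LEMMAS AND PROOFS =====

-- common reference shape: pairwise merge of leading single-char words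
def pvMerge : List String → List String
  | [] => []
  | [w] => [w]
  | w1 :: w2 :: rest =>
    if PySem.Str.len w1 = 1 ∧ PySem.Str.len w2 = 1 then
      (w1 ++ w2) :: pvMerge rest
    else
      w1 :: pvMerge (w2 :: rest)

theorem pvMerge_cons_of_ne (w : String) (ws : List String)
    (h : ¬ PySem.Str.len w = 1) : pvMerge (w :: ws) = w :: pvMerge ws := by
  cases ws with
  | nil => rfl
  | cons x xs =>
    rw [pvMerge, if_neg]
    intro hc; exact h hc.1

theorem pvALoop_eq (words : List String) (i : Nat) (acc : List String) :
    pvALoop words i acc = acc ++ pvMerge (words.drop i) := by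
  induction i, acc using pvALoop.induct (words := words) with
  | case1 i acc h hc ih =>
    rw [pvALoop, dif_pos h, if_pos hc, ih]
    obtain ⟨h1, h2, h3⟩ := hc
    rw [List.drop_eq_getElem_cons h, List.drop_eq_getElem_cons h2, pvMerge, if_pos]
    · simp [List.getD_eq_getElem?_getD, h, h2]
    · constructor
      · rwa [List.getD_eq_getElem?_getD, List.getElem?_eq_getElem h] at h1
      · rwa [List.getD_eq_getElem?_getD, List.getElem?_eq_getElem h2] at h3
  | case2 i acc h hc ih =>
    rw [pvALoop, dif_pos h, if_neg hc, ih]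
    rw [List.drop_eq_getElem_cons h]
    have hg : words.getD i "" = words[i] := by
      simp [List.getD_eq_getElem?_getD, List.getElem?_eq_getElem h]
    by_cases h2 : i + 1 < words.length
    · rw [List.drop_eq_getElem_cons h2, pvMerge, if_neg, ← List.drop_eq_getElem_cons h2]
      · simp [List.getElem?_eq_getElem h]
      · intro ⟨hx, hy⟩
        exact hc ⟨by rwa [hg], h2, by
          rwa [List.getD_eq_getElem?_getD, List.getElem?_eq_getElem h2]⟩
    · have : words.drop (i+1) = [] := by
        apply List.drop_eq_nil_of_le; omega
      rw [this, hg]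
      simp [pvMerge]
  | case3 i acc h =>
    rw [pvALoop, dif_neg h]
    have : words.drop i = [] := by apply List.drop_eq_nil_of_le; omega
    rw [this, pvMerge]; simp

def pvFlush (st : List String × Option String) : List String := st.1 ++ st.2.toList

theorem pvB_fold_eq (ws : List String) :
    (∀ out, pvFlush (ws.foldl pvBStep (out, none)) = out ++ pvMerge ws) ∧
    (∀ out p, PySem.Str.len p = 1 →
      pvFlush (ws.foldl pvBStep (out, some p)) = out ++ pvMerge (p :: ws)) := by
  induction ws with
  | nil =>
    constructor
    · intro out; simp [pvFlush, pvMerge]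
    · intro out p _; simp [pvFlush, pvMerge]
  | cons w rest ih =>
    constructor
    · intro out
      by_cases hw : PySem.Str.len w = 1
      · rw [List.foldl_cons]
        show pvFlush (rest.foldl pvBStep (pvBStep (out, none) w)) = _
        have hw' : w.length = 1 := by simpa using hw
        rw [show pvBStep (out, none) w = (out, some w) by simp [pvBStep, hw']]
        exact ih.2 out w hw
      · rw [List.foldl_cons]
        show pvFlush (rest.foldl pvBStep (pvBStep (out, none) w)) = _
        have hw' : ¬ w.length = 1 := by simpa using hw
        rw [show pvBStep (out, none) w = (out ++ [w], none) by simp [pvBStep, hw']]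
        rw [ih.1, pvMerge_cons_of_ne w rest hw]
        simp
    · intro out p hp
      by_cases hw : PySem.Str.len w = 1
      · rw [List.foldl_cons]
        show pvFlush (rest.foldl pvBStep (pvBStep (out, some p) w)) = _
        have hw' : w.length = 1 := by simpa using hw
        rw [show pvBStep (out, some p) w = (out ++ [p ++ w], none) by simp [pvBStep, hw']]
        rw [ih.1, pvMerge, if_pos ⟨hp, hw⟩]
        simp
      · rw [List.foldl_cons]
        show pvFlush (rest.foldl pvBStep (pvBStep (out, some p) w)) = _
        have hw' : ¬ w.length = 1 := by simpa using hw
        rw [show pvBStep (out, some p) w = (out ++ [p, w], none) by simp [pvBStep, hw']]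
        rw [ih.1, pvMerge, if_neg (fun hc => hw hc.2), pvMerge_cons_of_ne w rest hw]
        simp

-- ===== VERDICT (by name: the statement is the Claim_ definition above) =====
theorem post_process_reconstructed_text_spec : Claim_equal_post_process_reconstructed_text := by
  intro text _
  unfold Spec_post_process_reconstructed_text post_process_reconstructed_text post_process_reconstructed_text_alt
  rw [pvALoop_eq]
  have := (pvB_fold_eq (PySem.Str.split₀ text)).1 []
  rw [pvFlush] at this
  simp only [List.drop_zero, List.nil_append]
  rw [this, List.nil_append]
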